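-- pv_equiv track=rewrite | github.com/Omargt16/teoria-de-automatas- | chess_F.py | AFN
-- ===== SOURCE A (Python) =====
-- def AFN(string,stateTable,q0):
--     #q0 = Initial state string = input
--     #CREATE VECTOR
--     size=len(string)+1
--     vector=[0]*size
--     vector[0]=q0
--     #We use it to add or insert new vectors in supervector
--     vector_copy=[0]*size
--     #We use it to know which are possible states of another state
--     possibleStates=[]
--     #Supervector
--     superVector=[[]]
--     superVector[0]=vector
--     #We start by going through the vector contained in supervector
--     vector_size=size-1
--     for i in range(vector_size):#Enter to each number of vector
--         superVector_index=0#Super vector index indicates the next possible state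
--         while(superVector_index<=len(superVector)-1):#Chech every possible state ultil there's no more vectors
--             possibleStates=stateTable[(superVector[superVector_index][i],string[i])]#Get possible states per number in vector
--             PossibleStatesSize=len(possibleStates)#get size of array
--             superVector[superVector_index][i+1]=possibleStates[0]#First element in possible states is set in next vector position each time
--             #make a copy
--             copy(vector_copy,superVector[superVector_index])
--             for k in range(PossibleStatesSize-1):#check the number of possible States
--                 vector_copy[i+1]=possibleStates[k+1]#Modify the vector copy by changing original number to possible state number
--                 #Make an auxiliar copy for avoiding problems
--                 auxiliar=[0]*size
--                 copy(auxiliar,vector_copy)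
--                 if superVector_index==(len(superVector)-1): #There's no right adjacent vector, so we can just append the modified copy of first vector
--                     superVector.append(auxiliar)#add modify vector to supervector
--                 else: #We insert, so right adjacent vectors move
--                     superVector.insert(superVector_index+1,auxiliar)
--                 superVector_index=superVector_index+1
--             superVector_index=superVector_index+1
--     return superVector
--
-- def copy(copy,originalVector):
--     for i in range(len(originalVector)):
--         copy[i]=originalVector[i]
--     return
-- ===== SOURCE B (Python) =====
-- def AFN(string, stateTable, q0):
--     # Recursive depth-first enumeration of the choice tree instead of the
--     # original's in-place insert/index simulation of a growing super-vector.
--     def rec(rest, path, cur):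
--         if not rest:
--             return [path]
--         out = []
--         for s in stateTable[(cur, rest[0])]:
--             out += rec(rest[1:], path + [s], s)
--         return out
--     return rec(string, [q0], q0)
-- ===== Notes on version B (the rewrite author's own statement) =====
-- stated objective: simpler
-- what changed: Replaces the in-place super-vector simulation (index-tracked while loop with list.insert/append and mutable copy buffers) by a short recursive depth-first enumeration of the choice tree that builds each state path by appending, yielding leaves in the same lexicographic order.
import Mathlib
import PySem

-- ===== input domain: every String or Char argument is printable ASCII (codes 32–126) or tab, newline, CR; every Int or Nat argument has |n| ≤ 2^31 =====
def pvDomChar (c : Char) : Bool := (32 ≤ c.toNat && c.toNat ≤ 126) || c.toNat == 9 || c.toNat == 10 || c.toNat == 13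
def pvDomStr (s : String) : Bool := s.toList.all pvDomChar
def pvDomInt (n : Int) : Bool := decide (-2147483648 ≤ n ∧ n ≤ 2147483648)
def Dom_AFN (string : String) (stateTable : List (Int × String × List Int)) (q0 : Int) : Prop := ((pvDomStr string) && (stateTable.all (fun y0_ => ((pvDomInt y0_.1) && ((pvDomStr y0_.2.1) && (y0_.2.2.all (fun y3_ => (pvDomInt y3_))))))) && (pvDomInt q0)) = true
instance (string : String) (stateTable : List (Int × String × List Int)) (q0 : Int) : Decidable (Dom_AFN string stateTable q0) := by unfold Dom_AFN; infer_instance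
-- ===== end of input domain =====

-- B replaces A's in-place insert/index super-vector simulation with a recursive
-- depth-first enumeration of the choice tree (objective: simpler; same output order).

-- ===== PORT A =====
-- dict lookup stateTable[(q, c)]: first matching key; `none` is exactly Python's KeyError (excluded by Pre_)
def pvTblGet? (tab : List (Int × String × List Int)) (q : Int) (c : String) : Option (List Int) :=
  (tab.find? (fun e => e.1 == q && e.2.1 == c)).map (fun e => e.2.2)

-- the inner `for k in range(PossibleStatesSize-1)` loop: structural recursion over
-- possibleStates[1:], carrying (vector_copy, superVector, superVector_index)
def pvInner (i : Nat) : List Int → List Int → List (List Int) → Nat → (List (List Int) × Nat)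
  | [], _, sv, idx => (sv, idx)
  | p :: rest, vcopy, sv, idx =>
      let vcopy' := vcopy.set (i+1) p          -- vector_copy[i+1] = possibleStates[k+1]
      let aux := vcopy'                        -- auxiliar = copy of vector_copy
      -- append when there is no right-adjacent vector, else insert after idx
      let sv' := if idx = sv.length - 1 then sv ++ [aux] else sv.insertIdx (idx+1) aux
      pvInner i rest vcopy' sv' (idx+1)

-- length/index bookkeeping of the inner loop; cited by pvWhile's decreasing_by
lemma pvInner_len (i : Nat) (ps : List Int) : ∀ (vcopy : List Int) (sv : List (List Int)) (idx : Nat),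
    idx < sv.length →
    (pvInner i ps vcopy sv idx).1.length = sv.length + ps.length ∧
    (pvInner i ps vcopy sv idx).2 = idx + ps.length := by
  induction ps with
  | nil => intro vcopy sv idx h; simp [pvInner]
  | cons p rest ih =>
    intro vcopy sv idx h
    simp only [pvInner]
    by_cases hb : idx = sv.length - 1
    · rw [if_pos hb]
      obtain ⟨h1, h2⟩ := ih (vcopy.set (i+1) p) (sv ++ [vcopy.set (i+1) p]) (idx+1) (by simp; omega)
      rw [h1, h2]; simp; omega
    · rw [if_neg hb]
      have hlen : (sv.insertIdx (idx+1) (vcopy.set (i+1) p)).length = sv.length + 1 := by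
        rw [List.length_insertIdx]; simp; omega
      obtain ⟨h1, h2⟩ := ih (vcopy.set (i+1) p) (sv.insertIdx (idx+1) (vcopy.set (i+1) p)) (idx+1) (by omega)
      rw [h1, h2, hlen]; simp; omega

-- the `while superVector_index <= len(superVector)-1` loop for symbol position i
-- (on Python ints, idx <= len-1  ⟺  idx < len)
def pvWhile (tab : List (Int × String × List Int)) (ch : String) (i : Nat)
    (sv : List (List Int)) (idx : Nat) : List (List Int) :=
  if h : idx < sv.length then
    let v := sv.getD idx []
    -- possibleStates = stateTable[(superVector[idx][i], string[i])]; KeyError excluded by Pre_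
    let ps := (pvTblGet? tab (v.getD i 0) ch).getD []
    -- superVector[idx][i+1] = possibleStates[0]; IndexError on an empty list excluded by Pre_
    let v' := v.set (i+1) (ps.getD 0 0)
    let r := pvInner i (ps.drop 1) v' (sv.set idx v') idx
    pvWhile tab ch i r.1 (r.2 + 1)
  else sv
termination_by sv.length - idx
decreasing_by
  have := pvInner_len i (((pvTblGet? tab ((sv.getD idx []).getD i 0) ch).getD []).drop 1)
      ((sv.getD idx []).set (i+1) (((pvTblGet? tab ((sv.getD idx []).getD i 0) ch).getD []).getD 0 0))
      (sv.set idx ((sv.getD idx []).set (i+1) (((pvTblGet? tab ((sv.getD idx []).getD i 0) ch).getD []).getD 0 0)))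
      idx (by simpa using h)
  simp only [List.length_set] at this
  omega

def AFN (string : String) (stateTable : List (Int × String × List Int)) (q0 : Int) : List (List Int) :=
  let size := string.toList.length + 1
  let vector := (List.replicate size (0:Int)).set 0 q0      -- vector = [0]*size; vector[0] = q0
  -- for i in range(vector_size): run the while loop from superVector_index = 0
  -- string[i]: i < len(string) throughout the range, so getD is exact
  (List.range (size - 1)).foldl
    (fun sv i => pvWhile stateTable (String.ofList [string.toList.getD i 'a']) i sv 0) [vector]

-- ===== PORT B =====
-- rec(rest, path, cur): depth-first over the remaining input suffix
def pvRec (tab : List (Int × String × List Int)) : List Char → List Int → Int → List (List Int)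
  | [], path, _ => [path]
  | c :: rest, path, cur =>
      -- for s in stateTable[(cur, rest[0])]: out += rec(rest[1:], path+[s], s)
      ((pvTblGet? tab cur (String.ofList [c])).getD []).foldl
        (fun out s => out ++ pvRec tab rest (path ++ [s]) s) []

def AFN_alt (string : String) (stateTable : List (Int × String × List Int)) (q0 : Int) : List (List Int) :=
  pvRec stateTable string.toList [q0] q0

-- ===== PRECONDITION & SPEC =====
-- states reachable after consuming one more symbol c from state set S
def pvNext (tab : List (Int × String × List Int)) (S : List Int) (c : Char) : List Int :=
  S.flatMap (fun q => (pvTblGet? tab q (String.ofList [c])).getD [])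

-- the transition table has a nonempty entry for every reachable state at every input position
def pvTotalFrom (tab : List (Int × String × List Int)) : List Int → List Char → Bool
  | _, [] => true
  | S, c :: rest =>
      S.all (fun q => !((pvTblGet? tab q (String.ofList [c])).getD []).isEmpty) &&
      pvTotalFrom tab (pvNext tab S c) rest

-- Pre_: exactly the inputs on which A returns normally — a missing (KeyError) or empty
-- (IndexError at possibleStates[0]) table entry for a reachable state makes A raise.
def Pre_AFN (string : String) (stateTable : List (Int × String × List Int)) (q0 : Int) : Prop :=
  pvTotalFrom stateTable [q0] string.toList = true
instance (string : String) (stateTable : List (Int × String × List Int)) (q0 : Int) : Decidable (Pre_AFN string stateTable q0) := by unfold Pre_AFN; infer_instance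

def pvWitness_AFN : String × (List (Int × String × List Int)) × Int := ("ab", [(0, "a", [0, 1]), (0, "b", [1]), (1, "a", [0]), (1, "b", [0])], 0)

def Spec_AFN (string : String) (stateTable : List (Int × String × List Int)) (q0 : Int) (out : List (List Int)) : Prop := out = AFN_alt string stateTable q0
instance (string : String) (stateTable : List (Int × String × List Int)) (q0 : Int) (out : List (List Int)) : Decidable (Spec_AFN string stateTable q0 out) := by unfold Spec_AFN; infer_instance

-- ===== CLAIM (what is proved, stated in full; the proofs are below) =====
def Claim_equal_AFN : Prop := ∀ (string : String) (stateTable : List (Int × String × List Int)) (q0 : Int), Dom_AFN string stateTable q0 → Pre_AFN string stateTable q0 → Spec_AFN string stateTable q0 (AFN string stateTable q0)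

-- ===== LEMMAS AND PROOFS =====

-- the block a single while-iteration expands superVector[idx] into
def pvBlk (tab : List (Int × String × List Int)) (ch : String) (i : Nat) (v : List Int) : List (List Int) :=
  let ps := (pvTblGet? tab (v.getD i 0) ch).getD []
  (v.set (i+1) (ps.getD 0 0)) :: (ps.drop 1).map (fun p => v.set (i+1) p)

lemma pvInsertIdx_append {α : Type} (pre post : List α) (a : α) :
    (pre ++ post).insertIdx pre.length a = pre ++ a :: post := by
  induction pre with
  | nil => simp
  | cons x xs ih => simp [List.insertIdx_succ_cons, ih]

lemma pvInner_spec (i : Nat) (ps : List Int) : ∀ (vcopy : List Int) (pre post : List (List Int)) (idx : Nat),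
    idx + 1 = pre.length →
    pvInner i ps vcopy (pre ++ post) idx
      = (pre ++ ps.map (fun p => vcopy.set (i+1) p) ++ post, idx + ps.length) := by
  induction ps with
  | nil => intro vcopy pre post idx h; simp [pvInner]
  | cons p rest ih =>
    intro vcopy pre post idx h
    simp only [pvInner]
    have hsv : (if idx = (pre ++ post).length - 1 then (pre ++ post) ++ [vcopy.set (i+1) p]
                else (pre ++ post).insertIdx (idx+1) (vcopy.set (i+1) p))
             = (pre ++ [vcopy.set (i+1) p]) ++ post := by
      by_cases hb : idx = (pre ++ post).length - 1
      · rw [if_pos hb]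
        have hpost : post = [] := by
          have := hb; simp [List.length_append] at this
          have : post.length = 0 := by omega
          exact List.eq_nil_of_length_eq_zero this
        subst hpost; simp
      · rw [if_neg hb, h, pvInsertIdx_append]
        simp
    rw [hsv]
    have := ih (vcopy.set (i+1) p) (pre ++ [vcopy.set (i+1) p]) post (idx+1)
      (by simp [← h])
    rw [this]
    simp [List.set_set, List.append_assoc]
    omega

lemma pvWhile_spec (tab : List (Int × String × List Int)) (ch : String) (i : Nat) :
    ∀ (n : Nat) (sv : List (List Int)) (idx : Nat), sv.length - idx ≤ n →
    pvWhile tab ch i sv idx = sv.take idx ++ (sv.drop idx).flatMap (pvBlk tab ch i) := by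
  intro n
  induction n with
  | zero =>
    intro sv idx h
    rw [pvWhile, dif_neg (by omega)]
    rw [List.take_of_length_le (by omega), List.drop_eq_nil_of_le (by omega)]
    simp
  | succ n ih =>
    intro sv idx h
    rw [pvWhile]
    by_cases hlt : idx < sv.length
    · rw [dif_pos hlt]
      simp only [List.getD_eq_getElem sv [] hlt]
      set v : List Int := sv[idx] with hv
      set ps : List Int := (pvTblGet? tab (v.getD i 0) ch).getD [] with hps
      set v' : List Int := v.set (i+1) (ps.getD 0 0) with hv'
      have hset : sv.set idx v' = (sv.take idx ++ [v']) ++ sv.drop (idx+1) := by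
        rw [List.set_eq_take_cons_drop v' hlt]; simp
      have hpre : idx + 1 = (sv.take idx ++ [v']).length := by
        simp [List.length_take]; omega
      rw [hset, pvInner_spec i (ps.drop 1) v' _ _ idx hpre]
      have hmap : (ps.drop 1).map (fun p => v'.set (i+1) p)
                = (ps.drop 1).map (fun p => v.set (i+1) p) := by
        simp [hv', List.set_set]
      have hblk : pvBlk tab ch i v = v' :: (List.drop 1 ps).map (fun p => v.set (i+1) p) := rfl
      have hre : (sv.take idx ++ [v']) ++ (List.drop 1 ps).map (fun p => v'.set (i+1) p) ++ sv.drop (idx+1)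
               = (sv.take idx ++ pvBlk tab ch i v) ++ sv.drop (idx+1) := by
        rw [hmap, hblk]; simp only [List.append_assoc, List.cons_append, List.nil_append]
      rw [hre]
      have hlenB : (sv.take idx ++ pvBlk tab ch i v).length = idx + (List.drop 1 ps).length + 1 := by
        rw [hblk]
        simp only [List.length_append, List.length_cons, List.length_map, List.length_take]
        omega
      have ihres := ih ((sv.take idx ++ pvBlk tab ch i v) ++ sv.drop (idx+1))
        (idx + (List.drop 1 ps).length + 1)
        (by simp only [List.length_append, hlenB, List.length_drop]; omega)
      rw [ihres, List.take_left' hlenB, List.drop_left' hlenB,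
        List.drop_eq_getElem_cons hlt]
      simp only [List.flatMap_cons, List.append_assoc]
      rfl
    · rw [dif_neg hlt]
      rw [List.take_of_length_le (by omega), List.drop_eq_nil_of_le (by omega)]
      simp

lemma pvLastD (p : List Int) (k : Nat) (h : p.length = k + 1) : p.getD k 0 = p.getLast?.getD 0 := by
  simp [List.getD, List.getLast?_eq_getElem?, h]

lemma pvMain (tab : List (Int × String × List Int)) (full : List Char) :
    ∀ (rem pre : List Char) (S : List Int) (paths : List (List Int)),
    full = pre ++ rem →
    pvTotalFrom tab S rem = true →
    (∀ p ∈ paths, p.length = pre.length + 1 ∧ p.getLast?.getD 0 ∈ S) →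
    (List.range' pre.length rem.length).foldl
        (fun sv i => sv.flatMap (pvBlk tab (String.ofList [full.getD i 'a']) i))
        (paths.map (fun p => p ++ List.replicate rem.length 0))
      = paths.flatMap (fun p => pvRec tab rem p (p.getLast?.getD 0)) := by
  intro rem
  induction rem with
  | nil =>
    intro pre S paths hfull htot hinv
    simp [pvRec]
  | cons c rest ih =>
    intro pre S paths hfull htot hinv
    simp only [List.length_cons, List.range'_succ, List.foldl_cons]
    have hch : full.getD pre.length 'a' = c := by rw [hfull]; simp
    rw [pvTotalFrom, Bool.and_eq_true] at htot
    obtain ⟨htot1, htot2⟩ := htot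
    rw [List.all_eq_true] at htot1
    -- the first fold step expands every padded path into its padded children
    have hstep : (paths.map (fun p => p ++ List.replicate (rest.length+1) 0)).flatMap
          (pvBlk tab (String.ofList [full.getD pre.length 'a']) pre.length)
        = (paths.flatMap (fun p =>
              ((pvTblGet? tab (p.getLast?.getD 0) (String.ofList [c])).getD []).map
                (fun s => p ++ [s]))).map
            (fun p => p ++ List.replicate rest.length 0) := by
      rw [hch, List.flatMap_map, List.map_flatMap]
      apply List.flatMap_congr
      intro p hp
      obtain ⟨hlen, hS⟩ := hinv p hp
      have hne : (pvTblGet? tab (p.getLast?.getD 0) (String.ofList [c])).getD [] ≠ [] := by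
        have := htot1 _ hS
        simpa [List.isEmpty_iff] using this
      obtain ⟨a, t, hat⟩ := List.exists_cons_of_ne_nil hne
      have hgetD : (p ++ List.replicate (rest.length+1) (0:Int)).getD pre.length 0
                 = p.getLast?.getD 0 := by
        rw [List.getD_append _ _ _ _ (by omega), pvLastD p pre.length hlen]
      have hset : ∀ s : Int, (p ++ List.replicate (rest.length+1) (0:Int)).set (pre.length+1) s
                 = (p ++ [s]) ++ List.replicate rest.length 0 := by
        intro s
        rw [List.replicate_succ, ← hlen, List.set_append_right _ _ (le_refl _)]
        simp
      simp only [pvBlk, hgetD, hat]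
      simp [hset, List.map_map, Function.comp_def]
    rw [hch] at hstep ⊢
    rw [hstep]
    have hpre' : full = (pre ++ [c]) ++ rest := by rw [hfull]; simp
    have hinv' : ∀ p' ∈ paths.flatMap (fun p =>
          ((pvTblGet? tab (p.getLast?.getD 0) (String.ofList [c])).getD []).map
            (fun s => p ++ [s])),
        p'.length = (pre ++ [c]).length + 1 ∧ p'.getLast?.getD 0 ∈ pvNext tab S c := by
      intro p' hp'
      rw [List.mem_flatMap] at hp'
      obtain ⟨p, hp, hmem⟩ := hp'
      rw [List.mem_map] at hmem
      obtain ⟨s, hs, rfl⟩ := hmem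
      obtain ⟨hlen, hS⟩ := hinv p hp
      refine ⟨by simp [hlen], ?_⟩
      rw [List.getLast?_concat]
      exact List.mem_flatMap.2 ⟨p.getLast?.getD 0, hS, by simpa using hs⟩
    have hIH := ih (pre ++ [c]) (pvNext tab S c)
      (paths.flatMap (fun p =>
        ((pvTblGet? tab (p.getLast?.getD 0) (String.ofList [c])).getD []).map
          (fun s => p ++ [s])))
      hpre' htot2 hinv'
    simp only [List.length_append, List.length_cons, List.length_nil, Nat.zero_add] at hIH
    rw [hIH]
    -- fold the DFS one level: rec on c :: rest
    simp only [pvRec, PySem.List.foldl_append_eq_flatMap, List.nil_append]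
    rw [List.flatMap_assoc]
    apply List.flatMap_congr
    intro p _
    rw [List.flatMap_map]
    apply List.flatMap_congr
    intro s _
    rw [List.getLast?_concat]
    rfl

-- the while loop started at index 0 expands the whole super-vector
lemma pvWhile_flatMap (tab : List (Int × String × List Int)) (ch : String) (i : Nat)
    (sv : List (List Int)) : pvWhile tab ch i sv 0 = sv.flatMap (pvBlk tab ch i) := by
  have := pvWhile_spec tab ch i sv.length sv 0 (by omega)
  simpa using this

-- ===== VERDICT (by name: the statement is the Claim_ definition above) =====
theorem AFN_spec : Claim_equal_AFN := by
  intro string stateTable q0 _hDom hPre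
  unfold Spec_AFN AFN AFN_alt
  simp only [Nat.add_sub_cancel, pvWhile_flatMap]
  have hv0 : (List.replicate (string.toList.length + 1) (0:Int)).set 0 q0
           = [q0] ++ List.replicate string.toList.length 0 := by
    simp [List.replicate_succ]
  rw [hv0, List.range_eq_range']
  have := pvMain stateTable string.toList string.toList [] [q0] [[q0]] rfl hPre
    (by intro p hp; simp at hp; simp [hp])
  simp only [List.length_nil, List.map_cons, List.map_nil] at this
  rw [this]
  simp
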